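-- pv_equiv track=rewrite | github.com/adnymics/redicts | src/redicts/util.py | build_key_hierarchy
-- ===== SOURCE A (Python) =====
-- def build_key_hierarchy(key):
--     """Build a list with key in it and all of it's parent keys.
--
--     :param key: (str) A dotted path.
--     :returns [str]: A list of keys.
--     """
--     all_keys = [key]
--     try:
--         while True:
--             key = key[:key.rindex('.')]
--             all_keys.append(key)
--     except ValueError:
--         pass
--
--     return all_keys
-- ===== SOURCE B (Python) =====
-- def build_key_hierarchy(key):
--     """Build a list with key in it and all of it's parent keys.
--
--     Split once into dotted segments, then emit the join of each prefix,
--     longest first.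
--     """
--     parts = key.split('.')
--     return ['.'.join(parts[:i]) for i in reversed(range(1, len(parts) + 1))]
-- ===== Notes on version B (the rewrite author's own statement) =====
-- stated objective: simpler
-- what changed: B splits the key once into dot-separated segments and emits the dot-join of each prefix from longest to shortest, replacing A's repeated rindex-truncation loop terminated by a caught ValueError.
import Mathlib
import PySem

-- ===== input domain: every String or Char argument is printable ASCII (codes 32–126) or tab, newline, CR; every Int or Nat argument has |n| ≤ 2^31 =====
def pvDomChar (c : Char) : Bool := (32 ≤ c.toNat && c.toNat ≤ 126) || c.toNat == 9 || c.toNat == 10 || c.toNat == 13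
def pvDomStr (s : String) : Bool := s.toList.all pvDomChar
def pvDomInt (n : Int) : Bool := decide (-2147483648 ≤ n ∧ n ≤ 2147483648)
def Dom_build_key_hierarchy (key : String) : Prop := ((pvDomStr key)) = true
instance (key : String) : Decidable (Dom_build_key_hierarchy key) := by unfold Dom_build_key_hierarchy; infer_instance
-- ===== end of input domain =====

-- B replaces A's repeated rindex-truncation loop (with its ValueError exit) by one
-- split into segments plus joins of descending prefixes: objective = simpler.

-- ===== PORT A =====
-- Hand port of key.rindex('.'): the HIGHEST index of the character '.' in the list,
-- none where Python raises ValueError ('.' absent).  Exact for the single-char needle.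
def rindexDot : List Char → Option Nat
  | [] => none
  | c :: rest =>
    match rindexDot rest with
    | some i => some (i + 1)
    | none => if c = '.' then some 0 else none

-- termination helper for aLoop (cited in decreasing_by)
theorem rindexDot_lt : ∀ {cs : List Char} {i : Nat}, rindexDot cs = some i → i < cs.length := by
  intro cs
  induction cs with
  | nil => intro i h; simp [rindexDot] at h
  | cons c rest ih =>
    intro i h
    simp only [rindexDot] at h
    cases hr : rindexDot rest with
    | some j =>
      rw [hr] at h
      have h2 : j + 1 = i := by injection h
      have := ih hr
      simp only [List.length_cons]
      omega
    | none =>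
      rw [hr] at h
      by_cases hc : c = '.' <;> simp [hc] at h
      simp only [List.length_cons]
      omega

-- the while True / try-except loop: append key, truncate at the last '.', stop on ValueError
def aLoop (cs : List Char) : List (List Char) :=
  cs ::
    (match h : rindexDot cs with
     | some i => aLoop (cs.take i)
     | none => [])
termination_by cs.length
decreasing_by
  exact lt_of_le_of_lt (List.length_take_le _ _) (rindexDot_lt h)

def build_key_hierarchy (key : String) : List String :=
  (aLoop key.toList).map String.ofList

-- ===== PORT B =====
-- Hand port of key.split('.') — exact for the single-char separator (''.split('.') = ['']).
def splitDot : List Char → List (List Char)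
  | [] => [[]]
  | c :: rest =>
    if c = '.' then [] :: splitDot rest
    else
      match splitDot rest with
      | p :: ps => (c :: p) :: ps
      | [] => [[c]]

-- Hand port of '.'.join(parts) — exact.
def joinDot : List (List Char) → List Char
  | [] => []
  | [p] => p
  | p :: ps => p ++ '.' :: joinDot ps

def build_key_hierarchy_alt (key : String) : List String :=
  let parts := splitDot key.toList
  ((PySem.List.pyRange 1 (parts.length + 1) 1).reverse).map
    (fun i => String.ofList (joinDot (PySem.List.slice parts none (some i))))

-- ===== PRECONDITION & SPEC =====
def Spec_build_key_hierarchy (key : String) (out : List String) : Prop := out = build_key_hierarchy_alt key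
instance (key : String) (out : List String) : Decidable (Spec_build_key_hierarchy key out) := by unfold Spec_build_key_hierarchy; infer_instance

-- ===== CLAIM (what is proved, stated in full; the proofs are below) =====
def Claim_equal_build_key_hierarchy : Prop := ∀ (key : String), Dom_build_key_hierarchy key → Spec_build_key_hierarchy key (build_key_hierarchy key)

-- ===== LEMMAS AND PROOFS =====

-- [n, n-1, …, 1]
def descNats : Nat → List Nat
  | 0 => []
  | n + 1 => (n + 1) :: descNats n

theorem splitDot_ne_nil (cs : List Char) : splitDot cs ≠ [] := by
  cases cs with
  | nil => simp [splitDot]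
  | cons c rest =>
    simp only [splitDot]
    split
    · simp
    · cases h : splitDot rest <;> simp

theorem joinDot_splitDot (cs : List Char) : joinDot (splitDot cs) = cs := by
  induction cs with
  | nil => rfl
  | cons c rest ih =>
    simp only [splitDot]
    split
    · rename_i hc
      subst hc
      cases h : splitDot rest with
      | nil => exact absurd h (splitDot_ne_nil rest)
      | cons p ps => rw [h] at ih; simp [joinDot, ih]
    · cases h : splitDot rest with
      | nil => exact absurd h (splitDot_ne_nil rest)
      | cons p ps =>
        rw [h] at ih
        cases ps with
        | nil => simp [joinDot] at ih ⊢; exact ih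
        | cons q qs => simp [joinDot] at ih ⊢; exact ih

theorem splitDot_of_rindexDot_none {cs : List Char} (h : rindexDot cs = none) :
    splitDot cs = [cs] := by
  induction cs with
  | nil => rfl
  | cons c rest ih =>
    simp only [rindexDot] at h
    cases hr : rindexDot rest with
    | some j => rw [hr] at h; simp at h
    | none =>
      rw [hr] at h
      by_cases hc : c = '.'
      · simp [hc] at h
      · simp only [splitDot, if_neg hc, ih hr]

theorem splitDot_of_rindexDot_some : ∀ {cs : List Char} {i : Nat}, rindexDot cs = some i →
    splitDot cs = splitDot (cs.take i) ++ [cs.drop (i + 1)] := by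
  intro cs
  induction cs with
  | nil => intro i h; simp [rindexDot] at h
  | cons c rest ih =>
    intro i h
    simp only [rindexDot] at h
    cases hr : rindexDot rest with
    | some j =>
      rw [hr] at h
      simp at h
      subst h
      have hrec := ih hr
      by_cases hc : c = '.'
      · subst hc
        simp only [splitDot, List.take_succ_cons, List.drop_succ_cons, hrec]
        rfl
      · simp only [splitDot, if_neg hc, List.take_succ_cons, List.drop_succ_cons, hrec]
        cases hq : splitDot (rest.take j) with
        | nil => exact absurd hq (splitDot_ne_nil _)
        | cons q qs => simp
    | none =>
      rw [hr] at h
      by_cases hc : c = '.'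
      · subst hc
        simp at h
        subst h
        simp [splitDot, splitDot_of_rindexDot_none hr]
      · simp [hc] at h

theorem mem_descNats {n j : Nat} (h : j ∈ descNats n) : j ≤ n := by
  induction n with
  | zero => simp [descNats] at h
  | succ m ih =>
    simp only [descNats, List.mem_cons] at h
    rcases h with h | h
    · omega
    · have := ih h; omega

-- the core loop invariant: A's loop lists the joins of all descending prefixes of the split
theorem aLoop_eq (cs : List Char) :
    aLoop cs = (descNats (splitDot cs).length).map (fun j => joinDot ((splitDot cs).take j)) := by
  rw [aLoop]
  split
  case _ i h =>
    have hlt := rindexDot_lt h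
    have ih := aLoop_eq (cs.take i)
    have hsplit := splitDot_of_rindexDot_some h
    rw [ih, hsplit]
    have hlen : (splitDot (cs.take i) ++ [cs.drop (i + 1)]).length
        = (splitDot (cs.take i)).length + 1 := by simp
    rw [hlen, descNats]
    simp only [List.map_cons]
    rw [List.take_of_length_le (le_of_eq hlen), ← hsplit, joinDot_splitDot]
    congr 1
    apply List.map_congr_left
    intro j hj
    have hle : j ≤ (splitDot (cs.take i)).length := mem_descNats hj
    rw [hsplit, List.take_append_of_le_length hle]
  case _ h =>
    rw [splitDot_of_rindexDot_none h]
    simp [descNats, joinDot]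
termination_by cs.length
decreasing_by
  exact lt_of_le_of_lt (List.length_take_le _ _) (rindexDot_lt ‹rindexDot cs = some _›)

theorem pyRange_reverse_eq (n : Nat) :
    (PySem.List.pyRange 1 ((n : Int) + 1) 1).reverse = (descNats n).map (fun (j : Nat) => (j : Int)) := by
  induction n with
  | zero => rw [PySem.List.pyRange_one_eq_nil (by omega)]; rfl
  | succ m ih =>
    have h1 : ((m + 1 : Nat) : Int) + 1 = ((m : Int) + 1) + 1 := by push_cast; ring
    rw [h1, PySem.List.pyRange_one_succ_right (by omega)]
    rw [List.reverse_append, List.reverse_singleton, List.singleton_append, ih]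
    simp only [descNats, List.map_cons]
    congr 1

-- ===== VERDICT (by name: the statement is the Claim_ definition above) =====
theorem build_key_hierarchy_spec : Claim_equal_build_key_hierarchy := by
  intro key _
  unfold Spec_build_key_hierarchy
  simp only [build_key_hierarchy, build_key_hierarchy_alt]
  rw [aLoop_eq]
  rw [pyRange_reverse_eq (splitDot key.toList).length]
  rw [List.map_map, List.map_map]
  apply List.map_congr_left
  intro j _
  simp only [Function.comp]
  rw [PySem.List.slice_to_natCast]
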